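-- pv_equiv track=rewrite | github.com/Tairin-Munoz/grafo-precedencia-bd2 | grafo_precedencia.py | construir_grafo
-- ===== SOURCE A (Python) =====
-- from collections import defaultdict
--
-- def parse_operation(op):
--     try:
--         tipo = op[0].upper()
--         transaccion = "T" + op[1]
--         dato = op[3]
--         return tipo, transaccion, dato
--     except:
--         return None
--
-- def construir_grafo(operaciones):
--     grafo = defaultdict(set)
--     parsed = []
--     transacciones = set()
--
--     for op in operaciones:
--         p = parse_operation(op)
--         if p:
--             parsed.append(p)
--             transacciones.add(p[1])
--
--     for i in range(len(parsed)):
--         tipo1, t1, dato1 = parsed[i]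
--         for j in range(i + 1, len(parsed)):
--             tipo2, t2, dato2 = parsed[j]
--             if t1 != t2 and dato1 == dato2:
--                 if tipo1 == 'W' or tipo2 == 'W':
--                     grafo[t1].add(t2)
--
--     for t in transacciones:
--         if t not in grafo:
--             grafo[t] = set()
--
--     return grafo
-- ===== SOURCE B (Python) =====
-- from collections import defaultdict
--
-- def parse_operation(op):
--     try:
--         tipo = op[0].upper()
--         transaccion = "T" + op[1]
--         dato = op[3]
--         return tipo, transaccion, dato
--     except:
--         return None
--
-- def construir_grafo(operaciones):
--     grafo = defaultdict(set)
--     parsed = []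
--     transacciones = set()
--
--     for op in operaciones:
--         p = parse_operation(op)
--         if p:
--             parsed.append(p)
--             transacciones.add(p[1])
--
--     # group the operations per data item once; each operation is then compared
--     # only against the later operations on the SAME data item
--     pendientes = defaultdict(list)
--     for p in parsed:
--         pendientes[p[2]].append(p)
--
--     for tipo1, t1, dato1 in parsed:
--         cola = pendientes[dato1]
--         cola.pop(0)  # drop the current operation; 'cola' is now its same-item suffix
--         for tipo2, t2, _ in cola:
--             if t1 != t2 and (tipo1 == 'W' or tipo2 == 'W'):
--                 grafo[t1].add(t2)
--
--     for t in transacciones: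
--         if t not in grafo:
--             grafo[t] = set()
--
--     return grafo
-- ===== Notes on version B (the rewrite author's own statement) =====
-- stated objective: alternative
-- what changed: B groups the parsed operations per data item once (a dict of per-item queues) and, for each operation, scans only the later operations on the same data item instead of A's inner scan over all later operations.
import Mathlib
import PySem

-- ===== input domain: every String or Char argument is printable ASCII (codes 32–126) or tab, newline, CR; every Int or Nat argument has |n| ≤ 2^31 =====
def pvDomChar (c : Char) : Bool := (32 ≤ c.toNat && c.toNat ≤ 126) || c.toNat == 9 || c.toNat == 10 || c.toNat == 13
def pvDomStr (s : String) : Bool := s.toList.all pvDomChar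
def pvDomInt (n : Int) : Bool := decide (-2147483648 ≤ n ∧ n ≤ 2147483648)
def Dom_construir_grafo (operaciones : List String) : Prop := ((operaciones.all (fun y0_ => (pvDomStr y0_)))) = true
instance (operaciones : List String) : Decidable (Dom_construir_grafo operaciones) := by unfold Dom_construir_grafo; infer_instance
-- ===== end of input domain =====

-- B groups the operations per data item once, so the inner scan runs only over later
-- operations on the SAME data item instead of over all later operations (objective: alternative).
-- Return-value equivalence only: dict/set insertion orders are as the Lean model fixes them.

-- ===== PORT A =====
-- helper of the Python module: parse_operation(op); the try/except returns None exactly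
-- when an index is out of range, i.e. when pyGet? yields none
def parse_operation (op : String) : Option (String × String × String) :=
  match PySem.Str.pyGet? op 0, PySem.Str.pyGet? op 1, PySem.Str.pyGet? op 3 with
  | some c0, some c1, some c3 =>
      some (String.ofList [PySem.Chars.upperChar c0], String.ofList ['T', c1], String.ofList [c3])
  | _, _, _ => none

-- first loop of construir_grafo (textually identical in A and in B): parsed list + set of transactions
def pvParse (operaciones : List String) :
    List (String × String × String) × PySem.Set String :=
  operaciones.foldl (fun acc op =>
    match parse_operation op with
    | some p => (acc.1 ++ [p], PySem.Set.add acc.2 p.2.1)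
    | none => acc) ([], PySem.Set.empty)

-- last loop of construir_grafo (textually identical in A and in B): add isolated transactions
def pvFill (transacciones : PySem.Set String)
    (grafo : PySem.Dict String (PySem.Set String)) : PySem.Dict String (PySem.Set String) :=
  transacciones.foldl (fun g t =>
    if g.contains t then g else g.insert t PySem.Set.empty) grafo

-- body of A's inner j-loop (the two nested ifs, as written)
def pvStepA (p1 : String × String × String) (g : PySem.Dict String (PySem.Set String))
    (p2 : String × String × String) : PySem.Dict String (PySem.Set String) :=
  if p1.2.1 ≠ p2.2.1 ∧ p1.2.2 = p2.2.2 then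
    if p1.1 = "W" ∨ p2.1 = "W" then
      g.insert p1.2.1 (PySem.Set.add (g.getD p1.2.1 PySem.Set.empty) p2.2.1)
    else g
  else g

def construir_grafo (operaciones : List String) : List (String × List String) :=
  let acc := pvParse operaciones
  let parsed := acc.1
  let transacciones := acc.2
  let grafo :=
    (PySem.List.pyRange 0 (PySem.List.len parsed)).foldl (fun g i =>
      let p1 := PySem.List.pyGetD parsed i ("", "", "")
      (PySem.List.pyRange (i + 1) (PySem.List.len parsed)).foldl (fun g j =>
        pvStepA p1 g (PySem.List.pyGetD parsed j ("", "", ""))) g) PySem.Dict.empty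
  (pvFill transacciones grafo).items

-- ===== PORT B =====
-- body of B's inner loop (one combined condition; dato is already equal by grouping)
def pvStepB (p1 : String × String × String) (g : PySem.Dict String (PySem.Set String))
    (p2 : String × String × String) : PySem.Dict String (PySem.Set String) :=
  if p1.2.1 ≠ p2.2.1 ∧ (p1.1 = "W" ∨ p2.1 = "W") then
    g.insert p1.2.1 (PySem.Set.add (g.getD p1.2.1 PySem.Set.empty) p2.2.1)
  else g

def construir_grafo_alt (operaciones : List String) : List (String × List String) :=
  let acc := pvParse operaciones
  let parsed := acc.1
  let transacciones := acc.2
  -- pendientes = defaultdict(list); for p in parsed: pendientes[p[2]].append(p)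
  let pendientes := parsed.foldl
    (fun d p => d.modify p.2.2 [] (fun l => l ++ [p]))
    (PySem.Dict.empty : PySem.Dict String (List (String × String × String)))
  -- for each op: pop it from its item's queue, then emit edges to the queue's remainder
  let res := parsed.foldl (fun st p1 =>
    let cola := (st.1.getD p1.2.2 []).drop 1
    (st.1.insert p1.2.2 cola, cola.foldl (pvStepB p1) st.2))
    (pendientes, (PySem.Dict.empty : PySem.Dict String (PySem.Set String)))
  (pvFill transacciones res.2).items

-- ===== PRECONDITION & SPEC =====
def Spec_construir_grafo (operaciones : List String) (out : List (String × List String)) : Prop := out = construir_grafo_alt operaciones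
instance (operaciones : List String) (out : List (String × List String)) : Decidable (Spec_construir_grafo operaciones out) := by unfold Spec_construir_grafo; infer_instance

-- ===== CLAIM (what is proved, stated in full; the proofs are below) =====
def Claim_equal_construir_grafo : Prop := ∀ (operaciones : List String), Dom_construir_grafo operaciones → Spec_construir_grafo operaciones (construir_grafo operaciones)

-- ===== LEMMAS AND PROOFS =====

-- A's nested index loop, rephrased structurally: visit each op, fold its full suffix
def pairsA : List (String × String × String) → PySem.Dict String (PySem.Set String) →
    PySem.Dict String (PySem.Set String)
  | [], g => g
  | p :: rest, g => pairsA rest (rest.foldl (pvStepA p) g)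

-- B's loop, rephrased structurally: visit each op, fold its same-dato suffix
def pairsB : List (String × String × String) → PySem.Dict String (PySem.Set String) →
    PySem.Dict String (PySem.Set String)
  | [], g => g
  | p :: rest, g => pairsB rest ((rest.filter (fun q => q.2.2 == p.2.2)).foldl (pvStepB p) g)

lemma rangeFold_eq_pairsA (l : List (String × String × String)) (g0 : PySem.Dict String (PySem.Set String)) :
    (List.range l.length).foldl
      (fun g k => (l.drop (k + 1)).foldl (pvStepA (l.getD k ("", "", ""))) g) g0
    = pairsA l g0 := by
  induction l generalizing g0 with
  | nil => simp [pairsA]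
  | cons p rest ih =>
    simp only [List.length_cons, List.range_succ_eq_map, List.foldl_cons, List.foldl_map,
      List.drop_succ_cons, List.getD_cons_succ, List.getD_cons_zero, List.drop_zero, pairsA]
    exact ih _

lemma Amid_eq_pairsA (l : List (String × String × String)) :
    (PySem.List.pyRange 0 (PySem.List.len l)).foldl (fun g i =>
      let p1 := PySem.List.pyGetD l i ("", "", "")
      (PySem.List.pyRange (i + 1) (PySem.List.len l)).foldl (fun g j =>
        pvStepA p1 g (PySem.List.pyGetD l j ("", "", ""))) g) PySem.Dict.empty
    = pairsA l PySem.Dict.empty := by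
  rw [show PySem.List.len l = ((l.length : Nat) : Int) from rfl, PySem.List.pyRange_zero_nat,
    List.foldl_map]
  rw [← rangeFold_eq_pairsA l PySem.Dict.empty]
  apply List.foldl_ext
  intro g k _
  show (PySem.List.pyRange ((k : Int) + 1) (PySem.List.len l)).foldl
      (fun g j => pvStepA (PySem.List.pyGetD l (k : Int) ("", "", "")) g (PySem.List.pyGetD l j ("", "", ""))) g
    = (l.drop (k + 1)).foldl (pvStepA (l.getD k ("", "", ""))) g
  rw [PySem.List.foldl_pyRange_pyGetD l ("", "", "") _ g (by omega : (0:Int) ≤ (k : Int) + 1)]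
  have ht : ((k : Int) + 1).toNat = k + 1 := by omega
  rw [ht, PySem.List.pyGetD_natCast]

lemma stepA_eq_stepB (p q : String × String × String) (g : PySem.Dict String (PySem.Set String))
    (h : q.2.2 = p.2.2) : pvStepA p g q = pvStepB p g q := by
  by_cases h1 : p.2.1 ≠ q.2.1 <;> by_cases h2 : p.1 = "W" ∨ q.1 = "W" <;>
    simp [pvStepA, pvStepB, h.symm, h1, h2]

lemma stepA_skip (p q : String × String × String) (g : PySem.Dict String (PySem.Set String))
    (h : ¬ q.2.2 = p.2.2) : pvStepA p g q = g := by
  simp only [pvStepA]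
  rw [if_neg (by exact fun hc => h hc.2.symm)]

lemma foldl_stepA_filter (p : String × String × String) :
    ∀ (l : List (String × String × String)) (g : PySem.Dict String (PySem.Set String)),
    l.foldl (pvStepA p) g = (l.filter (fun q => q.2.2 == p.2.2)).foldl (pvStepB p) g := by
  intro l
  induction l with
  | nil => intro g; rfl
  | cons q rest ih =>
    intro g
    by_cases h : q.2.2 = p.2.2
    · rw [List.foldl_cons, List.filter_cons_of_pos (by simp [h]), List.foldl_cons,
        stepA_eq_stepB p q g h, ih]
    · rw [List.foldl_cons, List.filter_cons_of_neg (by simp [h]),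
        stepA_skip p q g h, ih]

lemma pairsA_eq_pairsB :
    ∀ (l : List (String × String × String)) (g : PySem.Dict String (PySem.Set String)),
    pairsA l g = pairsB l g := by
  intro l
  induction l with
  | nil => intro g; rfl
  | cons p rest ih =>
    intro g
    simp only [pairsA, pairsB]
    rw [foldl_stepA_filter, ih]

lemma group_getD (l : List (String × String × String))
    (d0 : PySem.Dict String (List (String × String × String))) (dcode : String) :
    (l.foldl (fun d p => d.modify p.2.2 [] (fun v => v ++ [p])) d0).getD dcode []
      = d0.getD dcode [] ++ l.filter (fun q => q.2.2 == dcode) := by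
  induction l generalizing d0 with
  | nil => simp
  | cons p rest ih =>
    simp only [List.foldl_cons, List.filter_cons]
    rw [ih]
    by_cases h : dcode = p.2.2
    · subst h
      rw [PySem.Dict.getD_modify_self]
      simp
    · rw [PySem.Dict.getD_modify_of_ne _ _ _ h]
      simp [show (p.2.2 == dcode) = false by
        simp only [beq_eq_false_iff_ne, ne_eq]; exact fun hn => h hn.symm]

lemma Bmid_eq_pairsB :
    ∀ (l : List (String × String × String))
      (pend : PySem.Dict String (List (String × String × String)))
      (g : PySem.Dict String (PySem.Set String)),
    (∀ dcode, pend.getD dcode [] = l.filter (fun q => q.2.2 == dcode)) →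
    (l.foldl (fun st p1 =>
        let cola := (st.1.getD p1.2.2 []).drop 1
        (st.1.insert p1.2.2 cola, cola.foldl (pvStepB p1) st.2)) (pend, g)).2
      = pairsB l g := by
  intro l
  induction l with
  | nil => intro pend g _; rfl
  | cons p rest ih =>
    intro pend g hinv
    simp only [List.foldl_cons, pairsB]
    have hcola : (pend.getD p.2.2 []).drop 1 = rest.filter (fun q => q.2.2 == p.2.2) := by
      rw [hinv p.2.2]
      simp
    rw [hcola]
    apply ih
    intro dcode
    by_cases h : dcode = p.2.2
    · subst h
      rw [PySem.Dict.getD_insert_self]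
    · rw [PySem.Dict.getD_insert_of_ne _ _ _ h, hinv dcode]
      rw [List.filter_cons_of_neg (by
        simp only [beq_iff_eq]; exact fun hn => h hn.symm)]

-- ===== VERDICT (by name: the statement is the Claim_ definition above) =====
theorem construir_grafo_spec : Claim_equal_construir_grafo := by
  intro operaciones _
  unfold Spec_construir_grafo construir_grafo construir_grafo_alt
  simp only []
  congr 1
  rw [Amid_eq_pairsA, pairsA_eq_pairsB]
  rw [Bmid_eq_pairsB _ _ _ (fun dcode => by
    rw [group_getD]
    rfl)]
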